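-- pv_equiv track=rewrite | github.com/Kucev/CheckIO_Solutions | Unfair Dice.py | check
-- ===== SOURCE A (Python) =====
-- def check(enemy_die,ans):
--     s = 0
--     for i in ans:
--         ss = 0
--         for j in enemy_die:
--             if i > j:
--                 ss += 1
--             elif i < j:
--                 ss -= 1
--         s += ss
--     return s
-- ===== SOURCE B (Python) =====
-- def _bisect_left(a, x):
--     lo, hi = 0, len(a)
--     while lo < hi:
--         mid = (lo + hi) // 2
--         if a[mid] < x:
--             lo = mid + 1
--         else:
--             hi = mid
--     return lo
--
-- def _bisect_right(a, x):
--     lo, hi = 0, len(a)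
--     while lo < hi:
--         mid = (lo + hi) // 2
--         if x < a[mid]:
--             hi = mid
--         else:
--             lo = mid + 1
--     return lo
--
-- def check(enemy_die, ans):
--     se = sorted(enemy_die)
--     m = len(se)
--     total = 0
--     for i in ans:
--         less = _bisect_left(se, i)
--         greater = m - _bisect_right(se, i)
--         total += less - greater
--     return total
-- ===== Notes on version B (the rewrite author's own statement) =====
-- stated objective: faster
-- what changed: Instead of comparing every ans element against every enemy_die element, B sorts enemy_die once and for each ans element binary-searches (hand-written bisect_left/bisect_right) the counts of strictly smaller and strictly greater enemy values, adding their difference.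
import Mathlib
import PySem

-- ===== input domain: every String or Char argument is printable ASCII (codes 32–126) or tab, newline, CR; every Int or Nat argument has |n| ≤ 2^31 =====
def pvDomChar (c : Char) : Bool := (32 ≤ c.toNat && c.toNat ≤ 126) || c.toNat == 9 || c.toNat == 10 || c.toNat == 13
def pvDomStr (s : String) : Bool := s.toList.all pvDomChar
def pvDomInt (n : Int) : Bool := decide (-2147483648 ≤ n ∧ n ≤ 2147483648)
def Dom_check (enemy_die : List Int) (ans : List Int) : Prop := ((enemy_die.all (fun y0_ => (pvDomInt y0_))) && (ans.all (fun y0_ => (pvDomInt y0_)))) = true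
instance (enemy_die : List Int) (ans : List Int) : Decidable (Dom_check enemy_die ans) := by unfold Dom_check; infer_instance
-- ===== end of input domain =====

-- B replaces A's O(n·m) nested scan by sorting enemy_die once and binary-searching the
-- counts of smaller/greater elements for each element of ans (O((n+m) log m)).

-- ===== PORT A =====
def check (enemy_die : List Int) (ans : List Int) : Int :=
  ans.foldl (fun s i =>
    s + enemy_die.foldl (fun ss j =>
      if i > j then ss + 1 else if i < j then ss - 1 else ss) 0) 0

-- ===== PORT B =====
-- hand-written _bisect_left of Source B; the index mid always satisfies lo ≤ mid < hi ≤ len,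
-- so List.getD mid 0 is exactly Python's a[mid] here
def blAux (a : List Int) (x : Int) (lo hi : Nat) : Nat :=
  if h : lo < hi then
    let mid := (lo + hi) / 2
    if a.getD mid 0 < x then blAux a x (mid + 1) hi else blAux a x lo mid
  else lo
termination_by hi - lo
decreasing_by all_goals omega

-- hand-written _bisect_right of Source B (same in-range index argument)
def brAux (a : List Int) (x : Int) (lo hi : Nat) : Nat :=
  if h : lo < hi then
    let mid := (lo + hi) / 2
    if x < a.getD mid 0 then brAux a x lo mid else brAux a x (mid + 1) hi
  else lo
termination_by hi - lo
decreasing_by all_goals omega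

def check_alt (enemy_die : List Int) (ans : List Int) : Int :=
  let se := PySem.List.sorted enemy_die (fun x => x) false
  let m := se.length
  ans.foldl (fun total i =>
    total + ((blAux se i 0 m : Int) - ((m : Int) - (brAux se i 0 m : Int)))) 0

-- ===== PRECONDITION & SPEC =====
def Spec_check (enemy_die : List Int) (ans : List Int) (out : Int) : Prop := out = check_alt enemy_die ans
instance (enemy_die : List Int) (ans : List Int) (out : Int) : Decidable (Spec_check enemy_die ans out) := by unfold Spec_check; infer_instance

-- ===== CLAIM (what is proved, stated in full; the proofs are below) =====
def Claim_equal_check : Prop := ∀ (enemy_die : List Int) (ans : List Int), Dom_check enemy_die ans → Spec_check enemy_die ans (check enemy_die ans)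

-- ===== LEMMAS AND PROOFS =====

-- result of blAux keeps the loop invariant: everything below it is < x, everything from it on is ≥ x
lemma blAux_inv (a : List Int) (x : Int) (lo hi : Nat)
    (hle : lo ≤ hi) (hlen : hi ≤ a.length)
    (hlo : ∀ k, k < lo → a.getD k 0 < x)
    (hhi : ∀ k, hi ≤ k → k < a.length → ¬ a.getD k 0 < x)
    (hsort : ∀ p q, p ≤ q → q < a.length → a.getD p 0 ≤ a.getD q 0) :
    blAux a x lo hi ≤ a.length ∧
    (∀ k, k < blAux a x lo hi → a.getD k 0 < x) ∧
    (∀ k, blAux a x lo hi ≤ k → k < a.length → ¬ a.getD k 0 < x) := by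
  induction hn : hi - lo using Nat.strong_induction_on generalizing lo hi with
  | _ n ih =>
    by_cases hlt : lo < hi
    · rw [blAux, dif_pos hlt]
      have hmlo : lo ≤ (lo + hi) / 2 := by omega
      have hmhi : (lo + hi) / 2 < hi := by omega
      by_cases hc : a.getD ((lo + hi) / 2) 0 < x
      · simp only [if_pos hc]
        refine ih (hi - ((lo + hi) / 2 + 1)) (by omega) ((lo + hi) / 2 + 1) hi (by omega) hlen ?_ hhi rfl
        intro k hk
        rcases Nat.lt_or_ge k lo with h | h
        · exact hlo k h
        · exact lt_of_le_of_lt (hsort k ((lo + hi) / 2) (by omega) (by omega)) hc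
      · simp only [if_neg hc]
        refine ih ((lo + hi) / 2 - lo) (by omega) lo ((lo + hi) / 2) (by omega) (by omega) hlo ?_ rfl
        intro k hk hklen
        have := hsort ((lo + hi) / 2) k hk hklen
        omega
    · rw [blAux, dif_neg hlt]
      have : lo = hi := by omega
      exact ⟨by omega, hlo, by { intro k hk hklen; exact hhi k (by omega) hklen }⟩

lemma brAux_inv (a : List Int) (x : Int) (lo hi : Nat)
    (hle : lo ≤ hi) (hlen : hi ≤ a.length)
    (hlo : ∀ k, k < lo → a.getD k 0 ≤ x)
    (hhi : ∀ k, hi ≤ k → k < a.length → ¬ a.getD k 0 ≤ x)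
    (hsort : ∀ p q, p ≤ q → q < a.length → a.getD p 0 ≤ a.getD q 0) :
    brAux a x lo hi ≤ a.length ∧
    (∀ k, k < brAux a x lo hi → a.getD k 0 ≤ x) ∧
    (∀ k, brAux a x lo hi ≤ k → k < a.length → ¬ a.getD k 0 ≤ x) := by
  induction hn : hi - lo using Nat.strong_induction_on generalizing lo hi with
  | _ n ih =>
    by_cases hlt : lo < hi
    · rw [brAux, dif_pos hlt]
      have hmlo : lo ≤ (lo + hi) / 2 := by omega
      have hmhi : (lo + hi) / 2 < hi := by omega
      by_cases hc : x < a.getD ((lo + hi) / 2) 0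
      · simp only [if_pos hc]
        refine ih ((lo + hi) / 2 - lo) (by omega) lo ((lo + hi) / 2) (by omega) (by omega) hlo ?_ rfl
        intro k hk hklen
        have := hsort ((lo + hi) / 2) k hk hklen
        omega
      · simp only [if_neg hc]
        refine ih (hi - ((lo + hi) / 2 + 1)) (by omega) ((lo + hi) / 2 + 1) hi (by omega) hlen ?_ hhi rfl
        intro k hk
        rcases Nat.lt_or_ge k lo with h | h
        · exact hlo k h
        · exact le_trans (hsort k ((lo + hi) / 2) (by omega) (by omega)) (by omega)
    · rw [brAux, dif_neg hlt]
      have : lo = hi := by omega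
      exact ⟨by omega, hlo, by { intro k hk hklen; exact hhi k (by omega) hklen }⟩

-- a split index characterises countP
lemma countP_of_split (a : List Int) (p : Int → Bool) (r : Nat)
    (hr : r ≤ a.length)
    (h1 : ∀ k, k < r → p (a.getD k 0))
    (h2 : ∀ k, r ≤ k → k < a.length → ¬ p (a.getD k 0)) :
    a.countP p = r := by
  conv_lhs => rw [← List.take_append_drop r a]
  rw [List.countP_append]
  have hlen : (a.take r).length = r := by simp [hr]
  have ht : (a.take r).countP p = (a.take r).length := by
    apply List.countP_eq_length.mpr
    intro y hy
    obtain ⟨k, hk, rfl⟩ := List.mem_iff_getElem.mp hy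
    rw [List.getElem_take]
    have hk' : k < r := by omega
    have hka : k < a.length := by omega
    have := h1 k hk'
    rwa [List.getD_eq_getElem a 0 hka] at this
  have hd : (a.drop r).countP p = 0 := by
    apply List.countP_eq_zero.mpr
    intro y hy
    obtain ⟨k, hk, rfl⟩ := List.mem_iff_getElem.mp hy
    rw [List.getElem_drop]
    have hka : r + k < a.length := by simp at hk; omega
    have := h2 (r + k) (by omega) hka
    rwa [List.getD_eq_getElem a 0 hka] at this
  omega

lemma innerA (i : Int) (e : List Int) (ss : Int) :
    e.foldl (fun ss j => if i > j then ss + 1 else if i < j then ss - 1 else ss) ss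
      = ss + (e.countP (fun j => decide (j < i)) : Int)
          - (e.countP (fun j => decide (i < j)) : Int) := by
  induction e generalizing ss with
  | nil => simp
  | cons j t ih =>
      simp only [List.foldl_cons, List.countP_cons, ih]
      by_cases h1 : i > j
      · simp [h1, not_lt.mpr (le_of_lt h1)]; ring
      · by_cases h2 : i < j
        · simp [h1, h2]; ring
        · simp [h1, h2]

-- sorted enemy list, index-monotonicity in getD form
lemma sorted_getD_mono (e : List Int) (p q : Nat) (hpq : p ≤ q)
    (hq : q < (PySem.List.sorted e (fun x => x) false).length) :
    (PySem.List.sorted e (fun x => x) false).getD p 0 ≤ (PySem.List.sorted e (fun x => x) false).getD q 0 := by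
  rw [List.getD_eq_getElem _ 0 (by omega), List.getD_eq_getElem _ 0 hq]
  exact PySem.List.sorted_id_getElem_mono e hpq hq

-- _bisect_left over the sorted copy counts the elements of enemy_die below x
lemma bl_count (e : List Int) (x : Int) :
    blAux (PySem.List.sorted e (fun x => x) false) x 0 (PySem.List.sorted e (fun x => x) false).length
      = e.countP (fun j => decide (j < x)) := by
  obtain ⟨h1, h2, h3⟩ := blAux_inv (PySem.List.sorted e (fun x => x) false) x 0
    (PySem.List.sorted e (fun x => x) false).length (by omega) le_rfl
    (by intro k hk; omega) (by intro k hk hklen; omega) (sorted_getD_mono e)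
  rw [← (PySem.List.sorted_perm e (fun x => x) false).countP_eq]
  exact (countP_of_split _ _ _ h1 (by intro k hk; simpa using h2 k hk)
    (by intro k hk hklen; simpa using h3 k hk hklen)).symm

-- _bisect_right over the sorted copy counts the elements of enemy_die ≤ x
lemma br_count (e : List Int) (x : Int) :
    brAux (PySem.List.sorted e (fun x => x) false) x 0 (PySem.List.sorted e (fun x => x) false).length
      = e.countP (fun j => decide (j ≤ x)) := by
  obtain ⟨h1, h2, h3⟩ := brAux_inv (PySem.List.sorted e (fun x => x) false) x 0
    (PySem.List.sorted e (fun x => x) false).length (by omega) le_rfl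
    (by intro k hk; omega) (by intro k hk hklen; omega) (sorted_getD_mono e)
  rw [← (PySem.List.sorted_perm e (fun x => x) false).countP_eq]
  exact (countP_of_split _ _ _ h1 (by intro k hk; simpa using h2 k hk)
    (by intro k hk hklen; simpa using h3 k hk hklen)).symm

-- m - _bisect_right counts the elements of enemy_die above x
lemma sub_br (e : List Int) (x : Int) :
    ((PySem.List.sorted e (fun x => x) false).length : Int)
        - (brAux (PySem.List.sorted e (fun x => x) false) x 0 (PySem.List.sorted e (fun x => x) false).length : Int)
      = (e.countP (fun j => decide (x < j)) : Int) := by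
  rw [br_count, PySem.List.length_sorted]
  have h := List.length_eq_countP_add_countP (fun j => decide (j ≤ x)) (l := e)
  have hc : e.countP (fun j => decide ¬(decide (j ≤ x)) = true) = e.countP (fun j => decide (x < j)) := by
    apply List.countP_congr
    intro y _
    simp [not_le]
  omega

lemma check_eq_alt (e : List Int) (ans : List Int) : check e ans = check_alt e ans := by
  have hfun : (fun (s : Int) (i : Int) =>
      s + e.foldl (fun ss j => if i > j then ss + 1 else if i < j then ss - 1 else ss) 0)
      = (fun (total : Int) (i : Int) =>
      total + ((blAux (PySem.List.sorted e (fun x => x) false) i 0 (PySem.List.sorted e (fun x => x) false).length : Int)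
        - (((PySem.List.sorted e (fun x => x) false).length : Int)
            - (brAux (PySem.List.sorted e (fun x => x) false) i 0 (PySem.List.sorted e (fun x => x) false).length : Int)))) := by
    funext s i
    rw [innerA, bl_count, sub_br]
    ring
  show ans.foldl (fun (s : Int) (i : Int) =>
      s + e.foldl (fun ss j => if i > j then ss + 1 else if i < j then ss - 1 else ss) 0) 0
    = ans.foldl (fun (total : Int) (i : Int) =>
      total + ((blAux (PySem.List.sorted e (fun x => x) false) i 0 (PySem.List.sorted e (fun x => x) false).length : Int)
        - (((PySem.List.sorted e (fun x => x) false).length : Int)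
            - (brAux (PySem.List.sorted e (fun x => x) false) i 0 (PySem.List.sorted e (fun x => x) false).length : Int)))) 0
  rw [hfun]

-- ===== VERDICT (by name: the statement is the Claim_ definition above) =====
theorem check_spec : Claim_equal_check := by
  intro e ans _
  exact check_eq_alt e ans
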